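-- pv_equiv track=rewrite | github.com/jacopofar/advent2021 | advent2021/day03.py | count_zeros_ones
-- ===== SOURCE A (Python) =====
-- def count_zeros_ones(numbers: list[str]) -> tuple[list[int], list[int]]:
--     """Count how often a 0 or 1 digit appears in each position.
--
--     The numbers are strings of 0s and 1s, all with the same length.
--     """
--     ones = None
--     for line in numbers:
--         if ones is None:
--             ones = [0] * (len(line))
--         for idx, digit in enumerate(line):
--             if digit == "1":
--                 ones[idx] += 1
--     return [len(numbers) - v for v in ones], ones
-- ===== SOURCE B (Python) =====
-- def count_zeros_ones(numbers: list[str]) -> tuple[list[int], list[int]]: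
--     """Count how often a 0 or 1 digit appears in each position (column-wise)."""
--     width = len(numbers[0])
--     ones = [
--         sum(1 for line in numbers if idx < len(line) and line[idx] == "1")
--         for idx in range(width)
--     ]
--     return [len(numbers) - v for v in ones], ones
-- ===== Notes on version B (the rewrite author's own statement) =====
-- stated objective: alternative
-- what changed: Replaces A's row-major loop that mutates a running 'ones' accumulator with a column-wise pass: for each column index, count the lines with '1' there in one comprehension.
import Mathlib
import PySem

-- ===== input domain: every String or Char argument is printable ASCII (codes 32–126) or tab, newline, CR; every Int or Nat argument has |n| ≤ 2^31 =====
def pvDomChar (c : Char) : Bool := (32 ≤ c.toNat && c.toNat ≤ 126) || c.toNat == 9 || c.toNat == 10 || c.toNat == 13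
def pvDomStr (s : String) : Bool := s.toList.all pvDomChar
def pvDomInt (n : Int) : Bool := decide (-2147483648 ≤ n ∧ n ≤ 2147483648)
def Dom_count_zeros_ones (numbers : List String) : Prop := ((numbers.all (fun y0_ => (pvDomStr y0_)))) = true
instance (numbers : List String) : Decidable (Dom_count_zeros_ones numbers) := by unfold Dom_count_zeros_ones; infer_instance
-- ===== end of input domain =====

-- B replaces A's row-major accumulator mutation with a column-wise count per index (alternative decomposition, same cost).

-- ===== PORT A =====
-- inner loop 'for idx, digit in enumerate(line): if digit == "1": ones[idx] += 1'
-- (ones[idx] += 1 raises IndexError when idx ≥ len(ones); those inputs are excluded by Pre_, List.set is a no-op there)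
def pvA_inner (ones : List Int) (idx : Nat) (line : List Char) : List Int :=
  match line with
  | [] => ones
  | d :: rest =>
      pvA_inner (if d = '1' then ones.set idx (ones.getD idx 0 + 1) else ones) (idx + 1) rest

-- one iteration of 'for line in numbers' with the 'if ones is None' initialisation
def pvA_step (o : Option (List Int)) (line : String) : Option (List Int) :=
  let base := match o with
    | none => List.replicate line.toList.length (0 : Int)
    | some l => l
  some (pvA_inner base 0 line.toList)

def count_zeros_ones (numbers : List String) : List Int × List Int :=
  match numbers.foldl pvA_step none with
  | none => ([], [])   -- Python A raises TypeError here (empty input); excluded by Pre_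
  | some ones => (ones.map (fun v => (numbers.length : Int) - v), ones)

-- ===== PORT B =====
def count_zeros_ones_alt (numbers : List String) : List Int × List Int :=
  let width := (numbers.headD "").toList.length   -- len(numbers[0]); empty input raises, excluded by Pre_
  let ones := (List.range width).map (fun idx =>
    numbers.foldl (fun c line =>
      if idx < line.toList.length ∧ line.toList.getD idx ' ' = '1' then c + 1 else c) (0 : Int))
  (ones.map (fun v => (numbers.length : Int) - v), ones)

-- ===== PRECONDITION & SPEC =====
-- Pre_ excludes exactly the inputs on which A raises: the empty list (TypeError: ones stays
-- None) and lists where some line has a '1' at an index ≥ the first line's length (IndexError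
-- on ones[idx]); A returns normally everywhere else, including ragged lines without such a '1'.
def Pre_count_zeros_ones (numbers : List String) : Prop :=
  numbers ≠ [] ∧ ∀ s ∈ numbers, ∀ i < s.toList.length,
    (numbers.headD "").toList.length ≤ i → s.toList.getD i ' ' ≠ '1' 
instance (numbers : List String) : Decidable (Pre_count_zeros_ones numbers) := by
  unfold Pre_count_zeros_ones; infer_instance

def pvWitness_count_zeros_ones : List String := ["01", "11"]

def Spec_count_zeros_ones (numbers : List String) (out : List Int × List Int) : Prop := out = count_zeros_ones_alt numbers
instance (numbers : List String) (out : List Int × List Int) : Decidable (Spec_count_zeros_ones numbers out) := by unfold Spec_count_zeros_ones; infer_instance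

-- ===== CLAIM (what is proved, stated in full; the proofs are below) =====
def Claim_equal_count_zeros_ones : Prop := ∀ (numbers : List String), Dom_count_zeros_ones numbers → Pre_count_zeros_ones numbers → Spec_count_zeros_ones numbers (count_zeros_ones numbers)

-- ===== LEMMAS AND PROOFS =====

-- the predicate "line s has a '1' in column i"
def pvHasOne (i : Nat) (s : String) : Bool :=
  decide (i < s.toList.length ∧ s.toList.getD i ' ' = '1')

theorem pvA_inner_length (line : List Char) : ∀ (idx : Nat) (ones : List Int),
    (pvA_inner ones idx line).length = ones.length := by
  induction line with
  | nil => intro idx ones; simp [pvA_inner]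
  | cons d rest ih =>
      intro idx ones
      simp only [pvA_inner]
      rw [ih]
      split <;> simp

theorem pvA_inner_getD (line : List Char) : ∀ (idx : Nat) (ones : List Int),
    (∀ j, j < line.length → ones.length ≤ idx + j → line.getD j ' ' ≠ '1') → ∀ i, i < ones.length →
    (pvA_inner ones idx line).getD i 0 =
      ones.getD i 0 + (if idx ≤ i ∧ i - idx < line.length ∧ line.getD (i - idx) ' ' = '1' then 1 else 0) := by
  induction line with
  | nil => intro idx ones h i hi; simp [pvA_inner]
  | cons d rest ih =>
      intro idx ones h i hi
      simp only [pvA_inner]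
      set ones' := if d = '1' then ones.set idx (ones.getD idx 0 + 1) else ones with hdef
      have hlen : ones'.length = ones.length := by
        rw [hdef]; split <;> simp
      have h' : ∀ j, j < rest.length → ones'.length ≤ idx + 1 + j → rest.getD j ' ' ≠ '1' := by
        intro j hj hlen
        have := h (j + 1) (by simpa using hj) (by omega)
        simpa [List.getD_cons_succ] using this
      rw [ih (idx + 1) ones' h' i (by omega)]
      by_cases hii : i = idx
      · subst hii
        have hidx : i < ones.length := by omega
        have hv : ones'.getD i 0 = ones.getD i 0 + (if d = '1' then 1 else 0) := by
          rw [hdef]; split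
          · rw [List.getD_eq_getElem?_getD, List.getElem?_set_self (by omega)]; simp
          · simp
        rw [hv]
        have hc1 : ¬ (i + 1 ≤ i ∧ i - (i + 1) < rest.length ∧ rest.getD (i - (i + 1)) ' ' = '1') := by
          rintro ⟨h1, -⟩; omega
        rw [if_neg hc1]
        have hc2 : (i ≤ i ∧ i - i < (d :: rest).length ∧ (d :: rest).getD (i - i) ' ' = '1')
            ↔ d = '1' := by
          simp [List.length_cons]
        by_cases hd : d = '1'
        · rw [if_pos (hc2.mpr hd), if_pos hd]; ring
        · rw [if_neg (fun hx => hd (hc2.mp hx)), if_neg hd]; ring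
      · have hv : ones'.getD i 0 = ones.getD i 0 := by
          rw [hdef]; split
          · rw [List.getD_eq_getElem?_getD, List.getElem?_set_ne (by omega), ← List.getD_eq_getElem?_getD]
          · rfl
        rw [hv]
        congr 1
        by_cases hlt : idx ≤ i
        · have hgt : idx + 1 ≤ i := by omega
          have e1 : i - idx = (i - (idx + 1)) + 1 := by omega
          rw [e1, List.getD_cons_succ]
          simp only [List.length_cons]
          have hiff : (idx + 1 ≤ i ∧ i - (idx + 1) < rest.length ∧ rest.getD (i - (idx + 1)) ' ' = '1')
              ↔ (idx ≤ i ∧ i - (idx + 1) + 1 < rest.length + 1 ∧ rest.getD (i - (idx + 1)) ' ' = '1') := by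
            constructor <;> rintro ⟨h1, h2, h3⟩ <;> exact ⟨by omega, by omega, h3⟩
          rw [if_congr hiff rfl rfl]
          rfl
        · rw [if_neg (fun hx => hlt (Nat.le_of_succ_le hx.1)), if_neg (fun hx => hlt hx.1)]

theorem pvA_foldl_some (t : List String) : ∀ (l : List Int),
    t.foldl pvA_step (some l) = some (t.foldl (fun l line => pvA_inner l 0 line.toList) l) := by
  induction t with
  | nil => intro l; simp
  | cons s t ih => intro l; simpa [pvA_step] using ih (pvA_inner l 0 s.toList)

theorem pvA_foldl_length (t : List String) : ∀ (l : List Int),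
    (t.foldl (fun l line => pvA_inner l 0 line.toList) l).length = l.length := by
  induction t with
  | nil => intro l; rfl
  | cons s t ih => intro l; rw [List.foldl_cons, ih, pvA_inner_length]

theorem pvA_foldl_getD (t : List String) : ∀ (l : List Int),
    (∀ s ∈ t, ∀ j, j < s.toList.length → l.length ≤ j → s.toList.getD j ' ' ≠ '1') → ∀ i, i < l.length →
    (t.foldl (fun l line => pvA_inner l 0 line.toList) l).getD i 0 =
      l.getD i 0 + ((t.countP (pvHasOne i) : Nat) : Int) := by
  induction t with
  | nil => intro l _ i _; simp
  | cons s t ih =>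
      intro l hall i hi
      rw [List.foldl_cons]
      have hlen := pvA_inner_length s.toList 0 l
      rw [ih (pvA_inner l 0 s.toList)
            (fun x hx => by rw [hlen]; exact hall x (List.mem_cons_of_mem _ hx)) i (by omega)]
      rw [pvA_inner_getD s.toList 0 l
            (fun j hj hl => hall s List.mem_cons_self j hj (by omega)) i hi]
      rw [List.countP_cons]
      by_cases h : i < s.toList.length ∧ s.toList.getD i ' ' = '1'
      · have hd : pvHasOne i s = true := decide_eq_true h
        rw [hd, if_pos ⟨Nat.zero_le i, by simpa using h.1, by simpa using h.2⟩]
        simp; try omega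
      · have hd : pvHasOne i s = false := decide_eq_false h
        rw [hd, if_neg (fun hx => h ⟨by omega, by simpa using hx.2.2⟩)]
        simp; try omega

theorem pvB_count (i : Nat) (t : List String) : ∀ (c : Int),
    t.foldl (fun c line =>
      if i < line.toList.length ∧ line.toList.getD i ' ' = '1' then c + 1 else c) c
    = c + ((t.countP (pvHasOne i) : Nat) : Int) := by
  induction t with
  | nil => intro c; simp
  | cons s t ih =>
      intro c
      rw [List.foldl_cons, ih, List.countP_cons]
      by_cases h : i < s.toList.length ∧ s.toList.getD i ' ' = '1'
      · rw [if_pos h]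
        have hd : pvHasOne i s = true := decide_eq_true h
        rw [hd]; simp; try omega
      · rw [if_neg h]
        have hd : pvHasOne i s = false := decide_eq_false h
        rw [hd]; simp; try omega

-- ===== VERDICT (by name: the statement is the Claim_ definition above) =====
theorem count_zeros_ones_spec : Claim_equal_count_zeros_ones := by
  intro numbers _ hpre
  obtain ⟨hne, hall⟩ := hpre
  obtain ⟨h, t, rfl⟩ := List.exists_cons_of_ne_nil hne
  have hhd : ((h :: t).headD "") = h := rfl
  rw [hhd] at hall
  unfold Spec_count_zeros_ones count_zeros_ones count_zeros_ones_alt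
  have hA : (h :: t).foldl pvA_step none
      = some (t.foldl (fun l line => pvA_inner l 0 line.toList)
          (pvA_inner (List.replicate h.toList.length 0) 0 h.toList)) := by
    rw [List.foldl_cons]
    have : pvA_step none h = some (pvA_inner (List.replicate h.toList.length 0) 0 h.toList) := rfl
    rw [this, pvA_foldl_some]
  rw [hA, hhd]
  have hacc : (pvA_inner (List.replicate h.toList.length (0 : Int)) 0 h.toList).length
      = h.toList.length := by rw [pvA_inner_length]; simp
  have hLlen : (t.foldl (fun l line => pvA_inner l 0 line.toList)
      (pvA_inner (List.replicate h.toList.length 0) 0 h.toList)).length = h.toList.length := by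
    rw [pvA_foldl_length, hacc]
  have key : t.foldl (fun l line => pvA_inner l 0 line.toList)
        (pvA_inner (List.replicate h.toList.length 0) 0 h.toList)
      = (List.range h.toList.length).map (fun idx =>
          (h :: t).foldl (fun c line =>
            if idx < line.toList.length ∧ line.toList.getD idx ' ' = '1' then c + 1 else c) (0 : Int)) := by
    apply List.ext_getElem
    · rw [hLlen]; simp
    · intro i hi1 hi2
      have hiw : i < h.toList.length := by rwa [hLlen] at hi1
      have lhs : (t.foldl (fun l line => pvA_inner l 0 line.toList)
            (pvA_inner (List.replicate h.toList.length 0) 0 h.toList)).getD i 0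
          = (((h :: t).countP (pvHasOne i) : Nat) : Int) := by
        rw [pvA_foldl_getD t _
              (fun s hs j hj hl => hall s (List.mem_cons_of_mem _ hs) j hj (by rw [hacc] at hl; omega))
              i (by omega)]
        rw [pvA_inner_getD h.toList 0 (List.replicate h.toList.length 0)
              (fun j hj hl => hall h List.mem_cons_self j hj (by simpa using hl)) i (by simpa)]
        rw [List.countP_cons]
        by_cases hc : h.toList.getD i ' ' = '1'
        · have hd : pvHasOne i h = true := decide_eq_true ⟨hiw, hc⟩
          rw [hd, if_pos ⟨Nat.zero_le i, by simpa using hiw, by simpa using hc⟩]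
          simp; try omega
        · have hd : pvHasOne i h = false := decide_eq_false (fun hx => hc hx.2)
          rw [hd, if_neg (fun hx => hc (by simpa using hx.2.2))]
          simp; try omega
      rw [← List.getD_eq_getElem _ 0 hi1, lhs]
      rw [List.getElem_map, List.getElem_range]
      rw [pvB_count i (h :: t) 0]
      simp
  simp only [key]
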